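-- pv_equiv track=rewrite | github.com/mh0797/interPlan | interplan/planning/utils/modifications_preprocessing.py | create_modifications_dictionary
-- ===== SOURCE A (Python) =====
-- def create_modifications_dictionary(tokens: list):
--     modifications_dict = {}
--     for token in tokens:
--         if not "-" in token: token = token + "-"
--         split = token.split("-")
--         if split[0] not in modifications_dict: modifications_dict[split[0]] = []
--         modifications_dict[split[0]].append(split[1])
--     return modifications_dict
-- ===== SOURCE B (Python) =====
-- def _parts(token):
--     split = token.split("-")
--     return split[0], split[1] if len(split) > 1 else ""
--
-- def create_modifications_dictionary(tokens: list):
--     pairs = [_parts(t) for t in tokens]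
--     order = list(dict.fromkeys(p for p, _ in pairs))
--     return {k: [s for p, s in pairs if p == k] for k in order}
-- ===== Notes on version B (the rewrite author's own statement) =====
-- stated objective: alternative
-- what changed: Replaces A's single-pass dict accumulation (append each suffix into a lazily-created bucket) by a staged group-by: precompute all (prefix, suffix) pairs, dedup the prefixes in first-occurrence order, then build each group with a separate filter pass over the pair list (no mutable buckets).
import Mathlib
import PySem

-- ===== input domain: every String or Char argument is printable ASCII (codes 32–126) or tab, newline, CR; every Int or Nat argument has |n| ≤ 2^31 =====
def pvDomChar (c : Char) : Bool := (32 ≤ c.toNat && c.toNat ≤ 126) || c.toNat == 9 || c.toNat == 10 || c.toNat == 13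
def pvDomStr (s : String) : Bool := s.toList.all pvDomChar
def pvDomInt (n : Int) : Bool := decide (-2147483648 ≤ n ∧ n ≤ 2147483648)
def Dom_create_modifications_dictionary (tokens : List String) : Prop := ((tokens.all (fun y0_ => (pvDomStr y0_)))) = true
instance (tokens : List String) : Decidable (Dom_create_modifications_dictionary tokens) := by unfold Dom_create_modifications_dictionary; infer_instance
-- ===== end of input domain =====

-- B replaces A's single-pass dict accumulation by a staged group-by (pair list, deduped
-- prefixes, one filter pass per prefix); objective: alternative decomposition, same value.

-- ===== PORT A =====
-- Single pass: conditionally normalise the token, split on "-", init-then-append in a dict.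
-- ("-" is a nonempty separator, so `split?` is always `some`; `pyGetD` indexes 0 and 1, which
-- always exist after the normalisation, exactly as in the Python where no IndexError can occur.)
def create_modifications_dictionary (tokens : List String) : List (String × List String) :=
  (tokens.foldl
    (fun d token =>
      let token := if PySem.Str.isIn "-" token then token else token ++ "-"
      let split := (PySem.Str.split? token "-").getD []
      d.modify (PySem.List.pyGetD split 0 "") [] (· ++ [PySem.List.pyGetD split 1 ""]))
    PySem.Dict.empty).items

-- ===== PORT B =====
-- `_parts`: split on "-", take field 0 and (if present) field 1.
def pvParts (token : String) : String × String :=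
  let split := (PySem.Str.split? token "-").getD []
  (PySem.List.pyGetD split 0 "",
   if 1 < split.length then PySem.List.pyGetD split 1 "" else "")

-- pairs list, dict.fromkeys-dedup of the prefixes, one filter comprehension per prefix.
def create_modifications_dictionary_alt (tokens : List String) : List (String × List String) :=
  let pairs := tokens.map pvParts
  let order := PySem.List.dedup (pairs.map (fun p => p.1))
  order.map (fun k => (k, (pairs.filter (fun p => p.1 == k)).map (fun p => p.2)))

-- ===== PRECONDITION & SPEC =====
def Spec_create_modifications_dictionary (tokens : List String) (out : List (String × List String)) : Prop := out = create_modifications_dictionary_alt tokens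
instance (tokens : List String) (out : List (String × List String)) : Decidable (Spec_create_modifications_dictionary tokens out) := by unfold Spec_create_modifications_dictionary; infer_instance

-- ===== CLAIM (what is proved, stated in full; the proofs are below) =====
def Claim_equal_create_modifications_dictionary : Prop := ∀ (tokens : List String), Dom_create_modifications_dictionary tokens → Spec_create_modifications_dictionary tokens (create_modifications_dictionary tokens)

-- ===== LEMMAS AND PROOFS =====

lemma prefix_single_iff (c x : Char) (rest : List Char) :
    [c].isPrefixOf (x :: rest) = true ↔ x = c := by
  simp only [List.isPrefixOf, Bool.and_eq_true, beq_iff_eq, and_true]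
  exact eq_comm

lemma go_no_sep (c : Char) (l cur : List Char) (accs : List (List Char)) (fuel : Nat)
    (hf : l.length < fuel) (hc : c ∉ l) :
    PySem.Chars.splitOn.go [c] fuel l cur accs = accs.reverse ++ [cur.reverse ++ l] := by
  induction l generalizing cur accs fuel with
  | nil =>
    cases fuel with
    | zero => omega
    | succ f => simp [PySem.Chars.splitOn.go]
  | cons x rest ih =>
    cases fuel with
    | zero => omega
    | succ f =>
      have hx : ¬ ([c].isPrefixOf (x :: rest) = true) := by
        rw [prefix_single_iff]; intro h; exact hc (h ▸ List.mem_cons_self)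
      rw [PySem.Chars.splitOn.go, if_neg hx,
        ih (x :: cur) accs f (by simp at hf ⊢; omega) (fun h => hc (List.mem_cons_of_mem _ h))]
      simp

lemma go_trailing (c : Char) (l cur : List Char) (accs : List (List Char)) (fuel : Nat)
    (hf : l.length + 1 < fuel) (hc : c ∉ l) :
    PySem.Chars.splitOn.go [c] fuel (l ++ [c]) cur accs
      = accs.reverse ++ [cur.reverse ++ l, []] := by
  induction l generalizing cur accs fuel with
  | nil =>
    cases fuel with
    | zero => omega
    | succ f =>
      rw [List.nil_append, PySem.Chars.splitOn.go,
        if_pos ((prefix_single_iff c c []).mpr rfl)]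
      simp only [List.length_cons, List.length_nil, List.drop_succ_cons, List.drop_nil]
      cases f with
      | zero => omega
      | succ g => simp [PySem.Chars.splitOn.go]
  | cons x rest ih =>
    cases fuel with
    | zero => omega
    | succ f =>
      have hx : ¬ ([c].isPrefixOf (x :: (rest ++ [c])) = true) := by
        rw [prefix_single_iff]; intro h; exact hc (h ▸ List.mem_cons_self)
      rw [List.cons_append, PySem.Chars.splitOn.go, if_neg hx,
        ih (x :: cur) accs f (by simp at hf ⊢; omega) (fun h => hc (List.mem_cons_of_mem _ h))]
      simp

lemma go_length (c : Char) (l cur : List Char) (accs : List (List Char)) (fuel : Nat)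
    (hf : l.length < fuel) :
    (PySem.Chars.splitOn.go [c] fuel l cur accs).length = accs.length + 1 + l.count c := by
  induction l generalizing cur accs fuel with
  | nil =>
    cases fuel with
    | zero => omega
    | succ f => simp [PySem.Chars.splitOn.go]
  | cons x rest ih =>
    cases fuel with
    | zero => omega
    | succ f =>
      rw [PySem.Chars.splitOn.go]
      by_cases hx : [c].isPrefixOf (x :: rest) = true
      · have hxc : x = c := (prefix_single_iff c x rest).mp hx
        rw [if_pos hx]
        simp only [List.length_cons, List.length_nil, List.drop_succ_cons, List.drop_zero]
        rw [ih [] (cur.reverse :: accs) f (by simp at hf ⊢; omega)]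
        simp [hxc]
        omega
      · rw [if_neg hx, ih (x :: cur) accs f (by simp at hf ⊢; omega)]
        have hxc : ¬ x = c := fun h => hx ((prefix_single_iff c x rest).mpr h)
        simp [hxc]

lemma splitOn_no_sep (c : Char) (l : List Char) (hc : c ∉ l) :
    PySem.Chars.splitOn l [c] = [l] := by
  rw [PySem.Chars.splitOn, go_no_sep c l [] [] (l.length + 1) (by omega) hc]
  simp

lemma splitOn_trailing (c : Char) (l : List Char) (hc : c ∉ l) :
    PySem.Chars.splitOn (l ++ [c]) [c] = [l, []] := by
  rw [PySem.Chars.splitOn, go_trailing c l [] [] ((l ++ [c]).length + 1) (by simp) hc]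
  simp

lemma splitOn_length (c : Char) (l : List Char) :
    (PySem.Chars.splitOn l [c]).length = 1 + l.count c := by
  rw [PySem.Chars.splitOn, go_length c l [] [] (l.length + 1) (by omega)]
  simp

lemma split_parts (t : String) :
    (PySem.Str.split? t "-").getD []
      = (PySem.Chars.splitOn t.toList ['-']).map String.ofList := by
  simp [PySem.Str.split?, PySem.Chars.split?]

lemma isIn_dash_iff (t : String) : PySem.Str.isIn "-" t = true ↔ '-' ∈ t.toList := by
  rw [PySem.Str.isIn_iff_infix]
  constructor
  · intro h; exact h.subset (by simp)
  · intro h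
    obtain ⟨s, u, hsu⟩ := List.mem_iff_append.mp h
    exact ⟨s, u, by simp [hsu]⟩

-- A's loop body equals modify keyed by B's _parts helper
lemma stepA_eq (d : PySem.Dict String (List String)) (t : String) :
    (let token := if PySem.Str.isIn "-" t then t else t ++ "-"
     let split := (PySem.Str.split? token "-").getD []
     d.modify (PySem.List.pyGetD split 0 "") [] (· ++ [PySem.List.pyGetD split 1 ""]))
      = d.modify (pvParts t).1 [] (· ++ [(pvParts t).2]) := by
  by_cases hin : PySem.Str.isIn "-" t = true
  · have hmem : '-' ∈ t.toList := (isIn_dash_iff t).mp hin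
    have hlen : 1 < ((PySem.Str.split? t "-").getD []).length := by
      rw [split_parts]
      simp [splitOn_length]
      exact hmem
    simp only [hin, if_true, pvParts, if_pos hlen]
  · have hnot : '-' ∉ t.toList := fun h => hin ((isIn_dash_iff t).mpr h)
    have htl : (t ++ "-").toList = t.toList ++ ['-'] := by
      rw [String.toList_append]; rfl
    have hsplitA : (PySem.Str.split? (t ++ "-") "-").getD []
        = [String.ofList t.toList, ""] := by
      rw [split_parts, htl, splitOn_trailing '-' t.toList hnot]
      rfl
    have hsplitB : (PySem.Str.split? t "-").getD [] = [String.ofList t.toList] := by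
      rw [split_parts, splitOn_no_sep '-' t.toList hnot]
      rfl
    simp only [hin, Bool.false_eq_true, if_false]
    rw [hsplitA]
    simp only [pvParts, hsplitB]
    simp [PySem.List.pyGetD]

lemma cmd_items_eq (tokens : List String) :
    create_modifications_dictionary tokens = create_modifications_dictionary_alt tokens := by
  unfold create_modifications_dictionary create_modifications_dictionary_alt
  set pairs := tokens.map pvParts with hpairs
  have hstep : tokens.foldl
      (fun d token =>
        let token := if PySem.Str.isIn "-" token then token else token ++ "-"
        let split := (PySem.Str.split? token "-").getD []
        d.modify (PySem.List.pyGetD split 0 "") [] (· ++ [PySem.List.pyGetD split 1 ""]))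
      PySem.Dict.empty
      = pairs.foldl (fun d p => d.modify p.1 [] (· ++ [p.2])) PySem.Dict.empty := by
    rw [hpairs, List.foldl_map]
    exact PySem.List.foldl_congr_mem tokens _ _ PySem.Dict.empty
      (fun d t _ => stepA_eq d t)
  rw [hstep]
  set order := PySem.List.dedup (pairs.map (fun p => p.1)) with horder
  have hkeys : (pairs.foldl (fun d p => d.modify p.1 [] (· ++ [p.2]))
      PySem.Dict.empty).keys = order := by
    rw [PySem.Dict.keys_foldl_modify_key pairs (fun p => p.1) []
      (fun _ p => (· ++ [p.2])) PySem.Dict.empty]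
    rw [PySem.Dict.keys_empty, PySem.Set.update_nil_left, horder,
      PySem.List.dedup_eq_ofList]
  have hnodup : (pairs.foldl (fun d p => d.modify p.1 [] (· ++ [p.2]))
      PySem.Dict.empty).keys.Nodup := by
    rw [hkeys]; exact PySem.List.nodup_dedup _
  rw [PySem.Dict.items_eq_map_keys _ hnodup [], hkeys]
  apply List.map_congr_left
  intro k _
  rw [PySem.Dict.getD_foldl_modify_append pairs PySem.Dict.empty k, PySem.Dict.getD_empty]
  rfl

-- ===== VERDICT (by name: the statement is the Claim_ definition above) =====
theorem create_modifications_dictionary_spec : Claim_equal_create_modifications_dictionary := by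
  intro tokens _
  exact cmd_items_eq tokens
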